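-- pv_equiv track=rewrite | github.com/gosch/Katas-in-python | august/codesignal/sum_up_digits.py | reversedSumOfDigits
-- ===== SOURCE A (Python) =====
-- def reversedSumOfDigits(p, n):
--     if n == 1:
--         if 0 <= p <= 9:
--             return str(p)
--         return "-1"
--     if n * 9 < p or p < 1:
--         return "-1"
--     s = [0] * n
--     s[0] = 1
--     p -= 1
--     for i in reversed(range(n)):
--         while s[i] < 9 and p > 0:
--             s[i] += 1
--             p -= 1
--     return ''.join (map (str, s))
-- ===== SOURCE B (Python) =====
-- def reversedSumOfDigits(p, n):
--     if n == 1: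
--         return str(p) if 0 <= p <= 9 else "-1"
--     if n * 9 < p or p < 1:
--         return "-1"
--     full, r = divmod(p - 1, 9)
--     if full == n - 1:
--         return str(1 + r) + '9' * (n - 1)
--     return '1' + '0' * (n - 2 - full) + str(r) + '9' * full
-- ===== Notes on version B (the rewrite author's own statement) =====
-- stated objective: faster
-- what changed: Replaces the O(p) digit-by-digit greedy filling loop (a while inside a reversed for) with a closed form: divmod(p-1,9) gives the count of trailing 9s and the partial digit, and the answer is built by string repetition.
import Mathlib
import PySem

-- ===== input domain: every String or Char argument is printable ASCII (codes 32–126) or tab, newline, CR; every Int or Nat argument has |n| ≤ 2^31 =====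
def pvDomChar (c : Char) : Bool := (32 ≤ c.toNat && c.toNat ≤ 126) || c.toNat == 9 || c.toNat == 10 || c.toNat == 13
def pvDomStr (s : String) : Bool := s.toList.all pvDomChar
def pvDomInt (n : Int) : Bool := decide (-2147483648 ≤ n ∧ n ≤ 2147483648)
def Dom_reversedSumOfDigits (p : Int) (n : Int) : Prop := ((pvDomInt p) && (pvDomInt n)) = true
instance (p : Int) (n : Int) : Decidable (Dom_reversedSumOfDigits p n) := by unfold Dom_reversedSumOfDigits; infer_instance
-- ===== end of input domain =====

-- B replaces A's O(p) digit-by-digit greedy filling loop with the closed form divmod(p-1, 9)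
-- and builds the answer by string repetition (objective: faster).

-- ===== PORT A =====
-- the inner 'while s[i] < 9 and p > 0: s[i] += 1; p -= 1' loop
def pvWhile (si p : Int) : Int × Int :=
  if si < 9 ∧ p > 0 then pvWhile (si + 1) (p - 1) else (si, p)
termination_by (9 - si).toNat
decreasing_by omega

def reversedSumOfDigits (p : Int) (n : Int) : String :=
  if n = 1 then
    (if 0 ≤ p ∧ p ≤ 9 then PySem.Int.toStr p else "-1")
  else if n * 9 < p ∨ p < 1 then "-1"
  else
    -- s = [0] * n; s[0] = 1; p -= 1
    let s := PySem.List.pySetD (List.replicate n.toNat (0 : Int)) 0 1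
    -- for i in reversed(range(n)): the while loop touches only s[i] and p
    let res := ((PySem.List.pyRange 0 n 1).reverse).foldl
      (fun (st : List Int × Int) i =>
        (PySem.List.pySetD st.1 i (pvWhile (PySem.List.pyGetD st.1 i 0) st.2).1,
         (pvWhile (PySem.List.pyGetD st.1 i 0) st.2).2))
      (s, p - 1)
    PySem.Str.join "" (res.1.map PySem.Int.toStr)

-- ===== PORT B =====
-- string concatenation and '0'*k / '9'*k repetition are ported on List Char (exact)
def reversedSumOfDigits_alt (p : Int) (n : Int) : String :=
  if n = 1 then
    (if 0 ≤ p ∧ p ≤ 9 then PySem.Int.toStr p else "-1")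
  else if n * 9 < p ∨ p < 1 then "-1"
  else
    let full := PySem.Int.floordiv (p - 1) 9
    let r := PySem.Int.mod (p - 1) 9
    if full = n - 1 then
      String.ofList (PySem.Int.toChars (1 + r) ++ List.replicate (n - 1).toNat '9')
    else
      String.ofList ('1' :: List.replicate (n - 2 - full).toNat '0'
        ++ PySem.Int.toChars r ++ List.replicate full.toNat '9')

-- ===== PRECONDITION & SPEC =====
def Spec_reversedSumOfDigits (p : Int) (n : Int) (out : String) : Prop := out = reversedSumOfDigits_alt p n
instance (p : Int) (n : Int) (out : String) : Decidable (Spec_reversedSumOfDigits p n out) := by unfold Spec_reversedSumOfDigits; infer_instance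

-- ===== CLAIM (what is proved, stated in full; the proofs are below) =====
def Claim_equal_reversedSumOfDigits : Prop := ∀ (p : Int) (n : Int), Dom_reversedSumOfDigits p n → Spec_reversedSumOfDigits p n (reversedSumOfDigits p n)

-- ===== LEMMAS AND PROOFS =====

-- the digits A's loop produces on indices 0..k-1, built back-to-front with budget q
def pvBuild : Nat → Int → List Int
  | 0, _ => []
  | 1, q => [min 9 (1 + q)]
  | k + 2, q => pvBuild (k + 1) (max 0 (q - 9)) ++ [min 9 q]

lemma pvWhile_spec (si p : Int) (h1 : 0 ≤ si) (h2 : si ≤ 9) (h3 : 0 ≤ p) :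
    pvWhile si p = (min 9 (si + p), max 0 (p - (9 - si))) := by
  induction si, p using pvWhile.induct with
  | case1 si p h ih =>
    rw [pvWhile, if_pos h, ih (by omega) (by omega) (by omega)]
    simp only [Prod.mk.injEq]
    constructor <;> omega
  | case2 si p h =>
    rw [pvWhile, if_neg h]
    simp only [Prod.mk.injEq]
    constructor <;> omega

lemma pvBuild_succ (k : Nat) (hk : 1 ≤ k) (q : Int) :
    pvBuild (k + 1) q = pvBuild k (max 0 (q - 9)) ++ [min 9 q] := by
  obtain ⟨j, rfl⟩ : ∃ j, k = j + 1 := ⟨k - 1, by omega⟩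
  rfl

lemma pv_getD_prefix (l1 l2 : List Int) (x : Int) :
    PySem.List.pyGetD (l1 ++ x :: l2) (l1.length : Int) 0 = x := by
  simp [PySem.List.pyGetD_natCast]

-- the loop over indices k-1, …, 0 (as a foldr over range k): digits become pvBuild k q
lemma pv_loop (k : Nat) (hk : 1 ≤ k) : ∀ (q : Int), 0 ≤ q → ∀ (rest : List Int),
    List.foldr
      (fun (j : Nat) (st : List Int × Int) =>
        (PySem.List.pySetD st.1 (j : Int) (pvWhile (PySem.List.pyGetD st.1 (j : Int) 0) st.2).1,
         (pvWhile (PySem.List.pyGetD st.1 (j : Int) 0) st.2).2))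
      (1 :: List.replicate (k - 1) 0 ++ rest, q) (List.range k)
    = (pvBuild k q ++ rest, max 0 (q - (9 * k - 1))) := by
  induction k, hk using Nat.le_induction with
  | base =>
    intro q hq rest
    simp only [List.range_one, List.foldr_cons, List.foldr_nil, Nat.sub_self,
      List.replicate_zero, List.singleton_append]
    rw [PySem.List.pyGetD_natCast, PySem.List.pySetD_natCast]
    simp only [List.getD_cons_zero]
    rw [pvWhile_spec 1 q (by omega) (by omega) hq]
    simp only [List.set_cons_zero, pvBuild, List.cons_append, List.nil_append, Prod.mk.injEq]
    refine ⟨by simp, by push_cast; omega⟩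
  | succ k hk ih =>
    intro q hq rest
    rw [List.range_succ, List.foldr_append, List.foldr_cons, List.foldr_nil]
    have hsplit : (1 :: List.replicate (k + 1 - 1) 0 ++ rest : List Int)
        = (1 :: List.replicate (k - 1) 0) ++ (0 :: rest) := by
      have : (k + 1 - 1) = (k - 1) + 1 := by omega
      rw [this, List.replicate_succ']
      simp
    have hlen : ((1 : Int) :: List.replicate (k - 1) (0 : Int)).length = k := by
      simp; omega
    rw [hsplit]
    rw [show ((k : Nat) : Int) = (((1 : Int) :: List.replicate (k - 1) (0 : Int)).length : Int) by rw [hlen]]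
    rw [pv_getD_prefix, PySem.List.pySetD_natCast,
      pvWhile_spec 0 q (by omega) (by omega) hq]
    rw [show (9 : Int) - 0 = 9 by norm_num]
    simp only [zero_add, List.set_append_right _ _ (Nat.le_refl _), Nat.sub_self,
      List.set_cons_zero]
    rw [show ((1 : Int) :: List.replicate (k - 1) (0:Int)) ++ (min 9 q :: rest)
        = 1 :: List.replicate (k - 1) 0 ++ (min 9 q :: rest) by simp]
    rw [ih (max 0 (q - 9)) (by omega) (min 9 q :: rest)]
    rw [pvBuild_succ k hk q]
    simp only [List.append_assoc, List.cons_append, List.nil_append, Prod.mk.injEq]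
    refine ⟨by simp, by push_cast; omega⟩

-- closed form for pvBuild under the validity bounds (ediv/emod; divisor 9 > 0)
lemma pvBuild_closed (k : Nat) (hk : 1 ≤ k) : ∀ (q : Int), 0 ≤ q → q ≤ 9 * k - 1 →
    pvBuild k q = if q / 9 = (k : Int) - 1
      then (1 + q % 9) :: List.replicate (k - 1) 9
      else 1 :: List.replicate (k - 2 - (q / 9).toNat) 0 ++ q % 9 :: List.replicate (q / 9).toNat 9 := by
  induction k, hk using Nat.le_induction with
  | base =>
    intro q h0 h1
    have hd : q / 9 = 0 := by omega
    have hm : q % 9 = q := by omega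
    rw [if_pos (by omega)]
    simp only [pvBuild, hm, Nat.sub_self, List.replicate_zero]
    have hmin : min 9 (1 + q) = 1 + q := by omega
    rw [hmin]
  | succ k hk ih =>
    intro q h0 h1
    rw [pvBuild_succ k hk q]
    by_cases h9 : q ≤ 8
    · have hq' : max 0 (q - 9) = 0 := by omega
      have hmin : min 9 q = q := by omega
      have hd : q / 9 = 0 := by omega
      have hm : q % 9 = q := by omega
      rw [hq', hmin, ih 0 (by omega) (by omega)]
      by_cases hk1 : k = 1
      · subst hk1
        rw [if_pos (by norm_num), if_neg (by omega)]
        simp [hd, hm]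
      · rw [if_neg (by omega), if_neg (by omega)]
        have hz : (0 : Int) / 9 = 0 := by norm_num
        have hzm : (0 : Int) % 9 = 0 := by norm_num
        rw [hz, hzm, hd, hm]
        have hrep : (List.replicate (k - 2) (0 : Int) ++ 0 :: List.replicate (0:Int).toNat 9) ++ [q]
            = List.replicate (k + 1 - 2) 0 ++ q :: List.replicate (0:Int).toNat 9 := by
          simp only [Int.toNat_zero, List.replicate_zero]
          rw [show (k + 1 - 2) = (k - 2) + 1 by omega, List.replicate_succ']
        simpa using hrep
    · have hq' : max 0 (q - 9) = q - 9 := by omega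
      have hmin : min 9 q = 9 := by omega
      have hd : (q - 9) / 9 = q / 9 - 1 := by omega
      have hm : (q - 9) % 9 = q % 9 := by omega
      have hdpos : 1 ≤ q / 9 := by omega
      rw [hq', hmin, ih (q - 9) (by omega) (by omega), hd, hm]
      by_cases hc : q / 9 - 1 = (k : Int) - 1
      · rw [if_pos hc, if_pos (by omega)]
        rw [show (k + 1 - 1) = (k - 1) + 1 by omega, List.replicate_succ']
        simp
      · rw [if_neg hc, if_neg (by omega)]
        obtain ⟨u, hu⟩ : ∃ u, (q / 9).toNat = u + 1 := ⟨(q / 9).toNat - 1, by omega⟩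
        rw [show (q / 9 - 1).toNat = u by omega, hu]
        rw [show k + 1 - 2 - (u + 1) = k - 2 - u by omega, List.replicate_succ']
        simp

lemma pv_join_flatten (xss : List (List Char)) : PySem.Chars.join [] xss = xss.flatten := by
  induction xss with
  | nil => simp [PySem.Chars.join_nil]
  | cons x xs ih =>
    cases xs with
    | nil => simp [PySem.Chars.join_singleton]
    | cons y ys =>
      rw [PySem.Chars.join_cons_cons]
      simp only [List.flatten_cons] at ih ⊢
      rw [ih]
      simp

-- ===== VERDICT (by name: the statement is the Claim_ definition above) =====
theorem reversedSumOfDigits_spec : Claim_equal_reversedSumOfDigits := by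
  intro p n _hdom
  unfold Spec_reversedSumOfDigits reversedSumOfDigits reversedSumOfDigits_alt
  by_cases h1 : n = 1
  · simp [h1]
  by_cases h2 : n * 9 < p ∨ p < 1
  · simp [h1, h2]
  rw [if_neg h1, if_neg h2, if_neg h1, if_neg h2]
  -- valid branch: 2 ≤ n, 1 ≤ p ≤ 9n
  rw [not_or] at h2
  obtain ⟨h2a, h2b⟩ := h2
  have hple : p ≤ n * 9 := by omega
  have hp1 : 1 ≤ p := by omega
  have hn2 : 2 ≤ n := by omega
  set m : Nat := n.toNat with hm
  have hnm : (n : Int) = (m : Int) := by omega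
  have hm2 : 2 ≤ m := by omega
  set P : Int := p - 1 with hP
  have hP0 : 0 ≤ P := by omega
  have hPle : P ≤ 9 * (m : Int) - 1 := by omega
  -- A's initial list: [0]*n with s[0] = 1
  have hinit : PySem.List.pySetD (List.replicate n.toNat (0 : Int)) 0 1
      = 1 :: List.replicate (m - 1) 0 := by
    have hset := PySem.List.pySetD_natCast (List.replicate n.toNat (0 : Int)) 0 1
    rw [show (((0 : Nat)) : Int) = (0 : Int) by simp] at hset
    rw [hset, show n.toNat = (m - 1) + 1 by omega, List.replicate_succ, List.set_cons_zero]
  rw [hinit]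
  -- the reversed-range foldl is a foldr over range m
  rw [hnm, PySem.List.pyRange_zero_natCast]
  rw [show (List.map (fun (k : Nat) => (k : Int)) (List.range m)).reverse
      = List.map (fun (k : Nat) => (k : Int)) (List.range m).reverse by
    simp]
  simp only []
  rw [List.foldl_map, List.foldl_reverse]
  have hloop := pv_loop m (by omega) P hP0 []
  simp only [List.append_nil] at hloop
  rw [hloop]
  -- closed form for the digits
  have hclosed := pvBuild_closed m (by omega) P hP0 hPle
  -- B's divmod
  have hfd : PySem.Int.floordiv P 9 = P / 9 :=
    PySem.Int.floordiv_eq_ediv_of_pos (by norm_num)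
  have hmd : PySem.Int.mod P 9 = P % 9 :=
    PySem.Int.mod_eq_emod_of_pos (by norm_num)
  rw [hfd, hmd]
  have hd0 : 0 ≤ P / 9 := by omega
  have hdle : P / 9 ≤ (m : Int) - 1 := by omega
  have hr0 : 0 ≤ P % 9 := by omega
  have hr8 : P % 9 ≤ 8 := by omega
  apply String.toList_inj.mp
  rw [PySem.Str.toList_join, List.map_map]
  have htl : (res : List Int) → (List.map (String.toList ∘ PySem.Int.toStr) res)
      = List.map PySem.Int.toChars res := fun res => by
    simp [Function.comp, PySem.Int.toList_toStr]
  rw [show (String.toList "") = ([] : List Char) by rfl, htl, pv_join_flatten]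
  by_cases hfull : P / 9 = (m : Int) - 1
  · rw [if_pos hfull]
    rw [if_pos (by omega : P / 9 = ((m:Nat) : Int) - 1)] at hclosed
    rw [hclosed]
    simp only [List.map_cons, List.map_replicate, List.flatten_cons]
    rw [show PySem.Int.toChars 9 = ['9'] by decide, List.flatten_replicate_singleton]
    have h19 : ((m : Int) - 1).toNat = m - 1 := by omega
    rw [h19]
    simp
  · rw [if_neg hfull]
    rw [if_neg (by omega : ¬ P / 9 = ((m:Nat) : Int) - 1)] at hclosed
    rw [hclosed]
    simp only [List.map_cons, List.map_append, List.map_replicate, List.flatten_cons,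
      List.flatten_append]
    rw [show PySem.Int.toChars 1 = ['1'] by decide, show PySem.Int.toChars 0 = ['0'] by decide,
      show PySem.Int.toChars 9 = ['9'] by decide,
      List.flatten_replicate_singleton, List.flatten_replicate_singleton]
    have hc1 : ((m : Int) - 2 - P / 9).toNat = m - 2 - (P / 9).toNat := by omega
    rw [String.toList_ofList, hc1]
    simp
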